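-- pv_equiv track=rewrite | github.com/KRakeesh04/Sem01_labs | pp2_exercises/pp2ex14_name_sorting.py | sorting_the_names
-- ===== SOURCE A (Python) =====
-- def sorting_the_names(name_list :list) :
--     name01, name02 = name_list
--     iterration_count = min([len(name01),len(name02)])
--     for i in range(iterration_count):
--         if ord(name01[i]) < ord(name02[i]) :
--             return name01, name02
--         elif ord(name01[i]) > ord(name02[i]) :
--             return name02, name01
--         else :
--             continue
--     else :
--         return name01, name02
-- ===== SOURCE B (Python) =====
-- def sorting_the_names(name_list: list):
--     name01, name02 = name_list
--     common = min(len(name01), len(name02))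
--     if name01[:common] <= name02[:common]:
--         return name01, name02
--     return name02, name01
-- ===== Notes on version B (the rewrite author's own statement) =====
-- stated objective: simpler
-- what changed: Replaced the explicit per-character ord() comparison loop with a single built-in comparison of the two equal-length prefix slices (name01[:common] <= name02[:common]).
import Mathlib
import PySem

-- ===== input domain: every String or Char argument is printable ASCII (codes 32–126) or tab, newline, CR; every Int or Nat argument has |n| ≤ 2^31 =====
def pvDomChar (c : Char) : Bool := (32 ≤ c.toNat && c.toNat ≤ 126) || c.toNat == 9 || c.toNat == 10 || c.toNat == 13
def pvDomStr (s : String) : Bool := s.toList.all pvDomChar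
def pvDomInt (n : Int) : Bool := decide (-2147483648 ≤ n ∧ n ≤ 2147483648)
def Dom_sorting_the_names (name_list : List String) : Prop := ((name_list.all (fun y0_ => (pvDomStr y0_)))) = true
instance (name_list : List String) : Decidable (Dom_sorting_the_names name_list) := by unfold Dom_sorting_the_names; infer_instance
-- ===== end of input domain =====

-- B replaces A's per-character ord() loop by one slice comparison of the equal-length
-- prefixes (objective: simpler). Equivalence is on the return value; neither mutates its input.

-- ===== PORT A =====
-- the for-loop over range(iterration_count): at step i it compares ord(name01[i]) with
-- ord(name02[i]); walking the two character lists in lockstep is that loop, with the pair of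
-- remaining suffixes as the loop state. Returns true iff A takes the swapping `return`.
def pvLoopA : List Char → List Char → Bool
  | c :: cs, d :: ds =>
      if c.toNat < d.toNat then false
      else if c.toNat > d.toNat then true
      else pvLoopA cs ds
  | _, _ => false   -- range exhausted (i = min length): the for-else returns (name01, name02)

def sorting_the_names (name_list : List String) : String × String :=
  match name_list with
  | [name01, name02] =>
      if pvLoopA name01.toList name02.toList then (name02, name01) else (name01, name02)
  | _ => ("", "")   -- unreachable under Pre_: Python's unpacking raises here

-- ===== PORT B =====
def sorting_the_names_alt (name_list : List String) : String × String :=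
  if hl : name_list.length = 2 then
    let name01 := name_list[0]'(by omega)
    let name02 := name_list[1]'(by omega)
    let common := min name01.toList.length name02.toList.length
    -- Python str `<=` is code-point lexicographic = Lean's ≤ on List Char (per PYSEM);
    -- `p1 <= p2` is written as ¬ (p2 < p1)
    if name02.toList.take common < name01.toList.take common
    then (name02, name01) else (name01, name02)
  else ("", "")   -- unreachable under Pre_

-- ===== PRECONDITION & SPEC =====
-- Pre_: Python's `name01, name02 = name_list` raises ValueError unless the list has exactly 2 items.
def Pre_sorting_the_names (name_list : List String) : Prop := name_list.length = 2
instance (name_list : List String) : Decidable (Pre_sorting_the_names name_list) := by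
  unfold Pre_sorting_the_names; infer_instance

def pvWitness_sorting_the_names : List String := ["Bob", "Alice"]

def Spec_sorting_the_names (name_list : List String) (out : String × String) : Prop :=
  out = sorting_the_names_alt name_list
instance (name_list : List String) (out : String × String) :
    Decidable (Spec_sorting_the_names name_list out) := by
  unfold Spec_sorting_the_names; infer_instance

-- ===== CLAIM (what is proved, stated in full; the proofs are below) =====
def Claim_equal_sorting_the_names : Prop :=
  ∀ (name_list : List String), Dom_sorting_the_names name_list →
    Pre_sorting_the_names name_list →
    Spec_sorting_the_names name_list (sorting_the_names name_list)

-- ===== LEMMAS AND PROOFS =====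

-- A's loop verdict equals the strict slice comparison B evaluates.
theorem pvLoopA_eq_lt (cs ds : List Char) :
    pvLoopA cs ds
      = decide (ds.take (min cs.length ds.length) < cs.take (min cs.length ds.length)) := by
  induction cs generalizing ds with
  | nil => cases ds <;> simp [pvLoopA]
  | cons c cs ih =>
    cases ds with
    | nil => simp [pvLoopA]
    | cons d ds =>
      simp only [pvLoopA, List.length_cons, Nat.succ_min_succ, List.take_succ_cons,
        List.cons_lt_cons_iff, ih ds]
      rcases Nat.lt_trichotomy c.toNat d.toNat with h | h | h
      · have hlt : c < d := h
        simp [h, hlt.le, hlt.ne']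
      · have hcd : c = d := Char.ext (by exact UInt32.toNat_inj.mp h)
        simp [hcd]
      · have hgt : d < c := h
        simp [h, Nat.lt_asymm h, hgt]

-- ===== VERDICT (by name: the statement is the Claim_ definition above) =====
theorem sorting_the_names_spec : Claim_equal_sorting_the_names := by
  intro name_list _ hpre
  match name_list, hpre with
  | [n1, n2], _ =>
    unfold Spec_sorting_the_names sorting_the_names_alt
    show (if pvLoopA n1.toList n2.toList then (n2, n1) else (n1, n2))
        = (if n2.toList.take (min n1.toList.length n2.toList.length)
              < n1.toList.take (min n1.toList.length n2.toList.length)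
           then (n2, n1) else (n1, n2))
    rw [pvLoopA_eq_lt]
    simp only [decide_eq_true_eq]
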